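-- pv_equiv track=rewrite | github.com/nyh10063/Automatic-Annotation-of-Korean-Grammatical-Items | kmwe/stages/build_silver.py | _index_components_by_eid
-- ===== SOURCE A (Python) =====
-- from typing import Any, Iterable, Callable
--
-- def _index_components_by_eid(components_rows: Iterable[dict[str, Any]]) -> dict[str, list[dict[str, Any]]]:
--     grouped: dict[str, list[dict[str, Any]]] = {}
--     for row in components_rows:
--         e_id = row.get("e_id")
--         if not e_id:
--             continue
--         grouped.setdefault(str(e_id), []).append(row)
--     return grouped
-- ===== SOURCE B (Python) =====
-- def _index_components_by_eid(components_rows):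
--     # Two-pass grouping: keep rows with truthy e_id, dedup keys in first-seen
--     # order, then build each group by filtering; same result as the one-pass
--     # setdefault accumulation.
--     kept = [row for row in components_rows if row.get("e_id")]
--     keys = []
--     for row in kept:
--         k = str(row["e_id"])
--         if k not in keys:
--             keys.append(k)
--     return {k: [row for row in kept if str(row["e_id"]) == k] for k in keys}
-- ===== Notes on version B (the rewrite author's own statement) =====
-- stated objective: alternative
-- what changed: Replaces the single-pass setdefault-accumulating dict build with a two-pass scheme: filter the truthy-e_id rows once, dedup their keys in first-seen order, then form each group by a per-key filter comprehension.
import Mathlib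
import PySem

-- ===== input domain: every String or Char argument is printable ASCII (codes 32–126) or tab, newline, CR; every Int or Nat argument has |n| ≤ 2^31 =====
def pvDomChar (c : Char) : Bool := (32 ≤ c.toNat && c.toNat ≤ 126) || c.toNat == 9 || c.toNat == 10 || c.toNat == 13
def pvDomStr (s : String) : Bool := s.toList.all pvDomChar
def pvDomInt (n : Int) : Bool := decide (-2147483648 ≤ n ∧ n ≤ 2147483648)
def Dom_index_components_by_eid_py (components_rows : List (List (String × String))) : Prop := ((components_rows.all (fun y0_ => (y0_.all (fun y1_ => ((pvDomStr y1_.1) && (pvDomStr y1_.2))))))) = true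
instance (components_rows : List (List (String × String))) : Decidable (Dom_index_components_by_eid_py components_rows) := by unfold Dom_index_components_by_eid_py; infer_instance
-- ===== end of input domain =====

-- B replaces A's one-pass setdefault accumulation by a two-pass scheme (filter rows,
-- dedup keys in first-seen order, build each group by a per-key filter); same result,
-- objective: alternative decomposition (not faster).

-- ===== PORT A =====
-- A: single pass; grouped.setdefault(str(e_id), []).append(row) is
-- grouped[e] = grouped.get(e, []) + [row], i.e. Dict.modify e [] (· ++ [row]).
def index_components_by_eid_py (components_rows : List (List (String × String))) : List (String × List (List (String × String))) :=
  (components_rows.foldl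
    (fun grouped row =>
      match (PySem.Dict.mk row).get? "e_id" with
      | none => grouped          -- no e_id: continue
      | some e =>
        if e = "" then grouped   -- falsy e_id: continue
        else grouped.modify e [] (· ++ [row]))
    PySem.Dict.empty).items

-- ===== PORT B =====
-- str(row["e_id"]) for a kept row (str of a str is itself; key present on kept rows)
def pvKeyOf (row : List (String × String)) : String := (PySem.Dict.mk row).getD "e_id" ""

def index_components_by_eid_py_alt (components_rows : List (List (String × String))) : List (String × List (List (String × String))) :=
  let kept := components_rows.filter
    (fun row => match (PySem.Dict.mk row).get? "e_id" with
      | none => false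
      | some e => !(e = ""))
  let keys : PySem.Set String :=
    kept.foldl (fun ks row => PySem.Set.add ks (pvKeyOf row)) PySem.Set.empty
  keys.map (fun k => (k, kept.filter (fun row => pvKeyOf row == k)))

-- ===== PRECONDITION & SPEC =====
def Spec_index_components_by_eid_py (components_rows : List (List (String × String))) (out : List (String × List (List (String × String)))) : Prop := out = index_components_by_eid_py_alt components_rows
instance (components_rows : List (List (String × String))) (out : List (String × List (List (String × String)))) : Decidable (Spec_index_components_by_eid_py components_rows out) := by unfold Spec_index_components_by_eid_py; infer_instance

-- ===== CLAIM (what is proved, stated in full; the proofs are below) =====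
def Claim_equal_index_components_by_eid_py : Prop := ∀ (components_rows : List (List (String × String))), Dom_index_components_by_eid_py components_rows → Spec_index_components_by_eid_py components_rows (index_components_by_eid_py components_rows)

-- ===== LEMMAS AND PROOFS =====

-- the row filter shared by the analysis
def pvPred (row : List (String × String)) : Bool :=
  match (PySem.Dict.get? (PySem.Dict.mk row) "e_id") with
  | none => false
  | some e => !(e = "")

-- On a kept row, the key A uses equals pvKeyOf.
theorem pvKeyOf_of_get? (row : List (String × String)) (e : String)
    (h : (PySem.Dict.mk row).get? "e_id" = some e) : pvKeyOf row = e := by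
  simp [pvKeyOf, PySem.Dict.getD_eq_get?_getD, h]

-- A's skipping fold equals the plain modify-fold over the filtered rows.
theorem foldA_eq_fold_filter (l : List (List (String × String)))
    (d : PySem.Dict String (List (List (String × String)))) :
    l.foldl (fun grouped row =>
      match (PySem.Dict.mk row).get? "e_id" with
      | none => grouped
      | some e => if e = "" then grouped else grouped.modify e [] (· ++ [row])) d
    = (l.filter pvPred).foldl
        (fun g row => g.modify (pvKeyOf row) [] (· ++ [row])) d := by
  induction l generalizing d with
  | nil => rfl
  | cons r t ih =>
    simp only [List.foldl_cons, List.filter_cons]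
    rcases hg : (PySem.Dict.mk r).get? "e_id" with _ | e
    · simp only [pvPred, hg]
      exact ih d
    · by_cases he : e = ""
      · simp only [pvPred, hg, he]
        simp only [decide_true, Bool.not_true, if_pos, Bool.false_eq_true, if_false]
        exact ih d
      · simp only [pvPred, hg, he, decide_false, Bool.not_false, if_pos,
          List.foldl_cons]
        rw [pvKeyOf_of_get? r e hg]
        exact ih _

-- The modify-fold over the kept rows, read back at any key, is the per-key filter.
theorem getD_fold_modify (kept : List (List (String × String))) (k : String) :
    ((kept.foldl (fun g row => g.modify (pvKeyOf row) [] (· ++ [row]))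
        (PySem.Dict.empty : PySem.Dict String (List (List (String × String))))).getD k [])
    = kept.filter (fun row => pvKeyOf row == k) := by
  have h := PySem.Dict.getD_foldl_modify_append
    (l := kept.map (fun row => (pvKeyOf row, row)))
    (d := (PySem.Dict.empty : PySem.Dict String (List (List (String × String))))) (c := k)
  rw [List.foldl_map] at h
  simp only [PySem.Dict.getD_empty, List.nil_append, List.filter_map, List.map_map,
    Function.comp_def] at h
  simpa using h

theorem index_components_by_eid_py_eq_alt (components_rows : List (List (String × String))) :
    index_components_by_eid_py components_rows = index_components_by_eid_py_alt components_rows := by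
  have halt : index_components_by_eid_py_alt components_rows
      = (PySem.Set.ofList ((components_rows.filter pvPred).map pvKeyOf)).map
          (fun k => (k, (components_rows.filter pvPred).filter (fun row => pvKeyOf row == k))) := by
    show (((components_rows.filter pvPred).foldl
        (fun ks row => PySem.Set.add ks (pvKeyOf row)) PySem.Set.empty).map
        (fun k => (k, (components_rows.filter pvPred).filter (fun row => pvKeyOf row == k)))) = _
    rw [PySem.Set.ofList_eq_foldl, List.foldl_map]
    rfl
  rw [halt]
  unfold index_components_by_eid_py
  rw [foldA_eq_fold_filter]
  set kept := components_rows.filter pvPred with hkept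
  set d := kept.foldl (fun g row => g.modify (pvKeyOf row) [] (· ++ [row]))
    (PySem.Dict.empty : PySem.Dict String (List (List (String × String)))) with hd
  have hkeys : d.keys = PySem.Set.ofList (kept.map pvKeyOf) := by
    rw [hd, PySem.Dict.keys_foldl_modify_key]
    rw [PySem.Set.ofList_eq_foldl, List.foldl_map]
    simp [PySem.Set.update, List.foldl_map, PySem.Dict.keys_empty]
  have hnodup : d.keys.Nodup := by rw [hkeys]; exact PySem.Set.nodup_ofList _
  rw [PySem.Dict.items_eq_map_keys d hnodup ([]), hkeys]
  exact List.map_congr_left (fun k _ => by rw [getD_fold_modify kept k])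

-- ===== VERDICT (by name: the statement is the Claim_ definition above) =====
theorem index_components_by_eid_py_spec : Claim_equal_index_components_by_eid_py := by
  intro rows _
  unfold Spec_index_components_by_eid_py
  exact index_components_by_eid_py_eq_alt rows
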